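-- pv_equiv track=rewrite | github.com/Patsch36/Algorithmen-und-Komplexitaet | VL1/Aufgaben/Aufgabe3_GGT.py | stein_rec_trace
-- ===== SOURCE A (Python) =====
-- def stein_rec_trace(a, b, data):
--     data.append((a, b))
--     if b == 0:
--         return a
--     if a < b:
--         return stein_rec_trace(b, a, data)
--     if a % 2 == 0 and b % 2 == 0:
--         return 2 * stein_rec_trace(a // 2, b // 2, data)
--     if a % 2 == 0:
--         return stein_rec_trace(a // 2, b, data)
--     if b % 2 == 0:
--         return stein_rec_trace(a, b // 2, data)
--     else:
--         return stein_rec_trace(a - b, b, data)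
-- ===== SOURCE B (Python) =====
-- def stein_rec_trace(a, b, data):
--     # Classic Euclidean algorithm instead of Stein's binary GCD; same return
--     # value, but the trace appended to `data` records the Euclid remainder
--     # steps, not A's binary steps (equivalence claimed for the return value).
--     data.append((a, b))
--     while b != 0:
--         a, b = b, a % b
--         data.append((a, b))
--     return a
-- ===== Notes on version B (the rewrite author's own statement) =====
-- stated objective: simpler
-- what changed: Replaced the recursive Stein binary GCD (swap/halve/subtract with a factor 2 applied on the way back) by the classic iterative Euclidean remainder algorithm; the in-place trace written to `data` consequently records Euclid steps instead of Stein steps, the equivalence is about the returned value.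
import Mathlib
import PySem

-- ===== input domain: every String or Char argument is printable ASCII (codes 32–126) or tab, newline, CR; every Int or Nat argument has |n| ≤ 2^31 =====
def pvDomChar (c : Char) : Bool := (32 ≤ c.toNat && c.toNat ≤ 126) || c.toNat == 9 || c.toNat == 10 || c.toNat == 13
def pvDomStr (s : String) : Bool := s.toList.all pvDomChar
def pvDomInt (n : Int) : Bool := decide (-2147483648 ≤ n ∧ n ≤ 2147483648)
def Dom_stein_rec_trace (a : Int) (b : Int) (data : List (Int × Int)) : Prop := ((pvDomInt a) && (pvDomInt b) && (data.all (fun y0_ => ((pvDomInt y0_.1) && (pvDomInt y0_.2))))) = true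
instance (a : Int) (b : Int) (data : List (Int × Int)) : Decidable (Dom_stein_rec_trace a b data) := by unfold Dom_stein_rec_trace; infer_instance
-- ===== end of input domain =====

-- B replaces A's recursive Stein binary GCD by the classic iterative Euclidean remainder
-- algorithm; A mutates `data` in place (Stein trace) and B appends its own Euclid trace, so the
-- equivalence proved here is about the RETURN value only (the ports return just the Int).

-- ===== PORT A =====
-- Fuel only makes A's recursion total; within Pre_ the fuel 2*(|a|+|b|)+4 is never exhausted.
def steinA : Nat → Int → Int → Int
  | 0, _, _ => 0
  | n + 1, a, b =>
    if b = 0 then a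
    else if a < b then steinA n b a
    else if PySem.Int.mod a 2 = 0 ∧ PySem.Int.mod b 2 = 0 then
      2 * steinA n (PySem.Int.floordiv a 2) (PySem.Int.floordiv b 2)
    else if PySem.Int.mod a 2 = 0 then steinA n (PySem.Int.floordiv a 2) b
    else if PySem.Int.mod b 2 = 0 then steinA n a (PySem.Int.floordiv b 2)
    else steinA n (a - b) b

def stein_rec_trace (a : Int) (b : Int) (_data : List (Int × Int)) : Int :=
  steinA (2 * (a.natAbs + b.natAbs) + 4) a b

-- ===== PORT B =====
-- B's while-loop: a, b = b, a % b until b = 0.  Fuel |b|+1 is exact: |a % b| < |b| each turn.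
def euclidB : Nat → Int → Int → Int
  | 0, a, _ => a
  | n + 1, a, b => if b = 0 then a else euclidB n b (PySem.Int.mod a b)

def stein_rec_trace_alt (a : Int) (b : Int) (_data : List (Int × Int)) : Int :=
  euclidB (b.natAbs + 1) a b

-- ===== PRECONDITION & SPEC =====
-- Pre_ excludes the inputs on which Python A does not return: with a negative component and
-- b ≠ 0 the recursion never reaches b == 0 and A dies with RecursionError.
def Pre_stein_rec_trace (a : Int) (b : Int) (data : List (Int × Int)) : Prop :=
  (0 ≤ a ∧ 0 ≤ b) ∨ b = 0
instance (a : Int) (b : Int) (data : List (Int × Int)) : Decidable (Pre_stein_rec_trace a b data) := by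
  unfold Pre_stein_rec_trace; infer_instance

def pvWitness_stein_rec_trace : Int × Int × (List (Int × Int)) := (12, 18, [])

def Spec_stein_rec_trace (a : Int) (b : Int) (data : List (Int × Int)) (out : Int) : Prop := out = stein_rec_trace_alt a b data
instance (a : Int) (b : Int) (data : List (Int × Int)) (out : Int) : Decidable (Spec_stein_rec_trace a b data out) := by unfold Spec_stein_rec_trace; infer_instance

-- ===== CLAIM =====
def Claim_equal_stein_rec_trace : Prop := ∀ (a : Int) (b : Int) (data : List (Int × Int)), Dom_stein_rec_trace a b data → Pre_stein_rec_trace a b data → Spec_stein_rec_trace a b data (stein_rec_trace a b data)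


-- ===== LEMMAS AND PROOFS =====

-- A's fuel recursion computes gcd once the fuel exceeds 2*(|a|+|b|) plus 1 for a pending swap.
theorem steinA_eq_gcd : ∀ (n : Nat) (a b : Int), 0 ≤ a → 0 ≤ b →
    2 * (a.natAbs + b.natAbs) + (if a < b then 1 else 0) < n →
    steinA n a b = (Int.gcd a b : Int) := by
  intro n
  induction n using Nat.strong_induction_on with
  | _ n ih =>
    intro a b ha hb hfuel
    match n, hfuel with
    | m + 1, hfuel =>
    simp only [steinA]
    by_cases hb0 : b = 0
    · simp [hb0, Int.natAbs_of_nonneg ha]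
    have hb1 : 1 ≤ b := by omega
    split_ifs with hlt hev hae hbe
    · -- swap
      rw [if_pos hlt] at hfuel
      rw [ih m (by omega) b a hb ha (by rw [if_neg (by omega : ¬ b < a)]; omega), Int.gcd_comm]
    · -- both even
      obtain ⟨hda, hdb⟩ := hev
      rw [PySem.Int.mod_eq_zero_iff_dvd] at hda hdb
      obtain ⟨x, hx⟩ := hda; obtain ⟨y, hy⟩ := hdb
      have hfx : PySem.Int.floordiv a 2 = x := by
        have := PySem.Int.floordiv_mul_add_mod a 2
        have := PySem.Int.mod_eq_zero_iff_dvd a 2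
        have hm : PySem.Int.mod a 2 = 0 := by rw [PySem.Int.mod_eq_zero_iff_dvd]; exact ⟨x, hx⟩
        omega
      have hfy : PySem.Int.floordiv b 2 = y := by
        have := PySem.Int.floordiv_mul_add_mod b 2
        have hm : PySem.Int.mod b 2 = 0 := by rw [PySem.Int.mod_eq_zero_iff_dvd]; exact ⟨y, hy⟩
        omega
      have hxa : a.natAbs = 2 * x.natAbs := by subst hx; simp [Int.natAbs_mul]
      have hyb : b.natAbs = 2 * y.natAbs := by subst hy; simp [Int.natAbs_mul]
      rw [hfx, hfy, ih m (by omega) x y (by omega) (by omega)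
        (by split_ifs with h <;> omega)]
      have : Int.gcd a b = 2 * Int.gcd x y := by
        rw [hx, hy]; unfold Int.gcd; rw [hxa, hyb] at *
        simp [Int.natAbs_mul, Nat.gcd_mul_left]
      rw [this]; push_cast; ring
    · -- a even, b odd
      obtain ⟨x, hx⟩ := PySem.Int.mod_eq_zero_iff_dvd a 2 |>.mp hae
      have hfx : PySem.Int.floordiv a 2 = x := by
        have := PySem.Int.floordiv_mul_add_mod a 2
        have hm : PySem.Int.mod a 2 = 0 := by rw [PySem.Int.mod_eq_zero_iff_dvd]; exact ⟨x, hx⟩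
        omega
      have hxa : a.natAbs = 2 * x.natAbs := by subst hx; simp [Int.natAbs_mul]
      have hbodd : b.natAbs % 2 = 1 := by
        rcases PySem.Int.mod_two_eq b with h | h
        · exact absurd ⟨hae, h⟩ hev
        · have := PySem.Int.floordiv_mul_add_mod b 2
          omega
      have hcop : Nat.Coprime 2 b.natAbs := by
        unfold Nat.Coprime; rw [Nat.gcd_rec]; simp [hbodd]
      rw [hfx, ih m (by omega) x b (by omega) hb (by split_ifs with h <;> omega)]
      have : Int.gcd a b = Int.gcd x b := by
        unfold Int.gcd; rw [hxa, hcop.gcd_mul_left_cancel]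
      rw [this]
    · -- b even, a odd
      obtain ⟨y, hy⟩ := PySem.Int.mod_eq_zero_iff_dvd b 2 |>.mp hbe
      have hfy : PySem.Int.floordiv b 2 = y := by
        have := PySem.Int.floordiv_mul_add_mod b 2
        have hm : PySem.Int.mod b 2 = 0 := by rw [PySem.Int.mod_eq_zero_iff_dvd]; exact ⟨y, hy⟩
        omega
      have hyb : b.natAbs = 2 * y.natAbs := by subst hy; simp [Int.natAbs_mul]
      have haodd : a.natAbs % 2 = 1 := by
        rcases PySem.Int.mod_two_eq a with h | h
        · exact absurd h hae
        · have := PySem.Int.floordiv_mul_add_mod a 2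
          omega
      have hcop : Nat.Coprime 2 a.natAbs := by
        unfold Nat.Coprime; rw [Nat.gcd_rec]; simp [haodd]
      rw [hfy, ih m (by omega) a y ha (by omega) (by split_ifs with h <;> omega)]
      have : Int.gcd a b = Int.gcd a y := by
        unfold Int.gcd; rw [hyb, Nat.gcd_comm, hcop.gcd_mul_left_cancel, Nat.gcd_comm]
      rw [this]
    · -- both odd: subtract
      have haodd : a.natAbs % 2 = 1 := by
        rcases PySem.Int.mod_two_eq a with h | h
        · exact absurd h hae
        · have := PySem.Int.floordiv_mul_add_mod a 2
          omega
      have hge : b ≤ a := by omega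
      have hsub : (a - b).natAbs = a.natAbs - b.natAbs := by omega
      rw [ih m (by omega) (a - b) b (by omega) hb (by split_ifs with h <;> omega)]
      have : Int.gcd (a - b) b = Int.gcd a b := by
        unfold Int.gcd; rw [hsub, Nat.gcd_sub_self_left (by omega)]
      rw [this]

-- B's Euclid loop computes gcd once the fuel exceeds |b|.
theorem euclidB_eq_gcd : ∀ (n : Nat) (a b : Int), 0 ≤ a → 0 ≤ b → b.natAbs < n →
    euclidB n a b = (Int.gcd a b : Int) := by
  intro n
  induction n using Nat.strong_induction_on with
  | _ n ih =>
    intro a b ha hb hfuel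
    match n, hfuel with
    | m + 1, hfuel =>
    simp only [euclidB]
    by_cases hb0 : b = 0
    · simp [hb0, Int.natAbs_of_nonneg ha]
    have hbpos : 0 < b := by omega
    simp only [hb0, if_false]
    rw [PySem.Int.mod_eq_emod_of_pos hbpos]
    have hr0 : 0 ≤ a % b := Int.emod_nonneg a hb0
    have hrlt : a % b < b := Int.emod_lt_of_pos a hbpos
    rw [ih m (by omega) b (a % b) hb hr0 (by omega)]
    have : Int.gcd b (a % b) = Int.gcd a b := by
      unfold Int.gcd
      have h2 : a % b = ((a.natAbs % b.natAbs : Nat) : Int) := by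
        push_cast
        rw [abs_of_nonneg ha, abs_of_nonneg hb]
      have h1 : (a % b).natAbs = a.natAbs % b.natAbs := by
        rw [h2, Int.natAbs_natCast]
      calc Nat.gcd b.natAbs (a % b).natAbs
          = Nat.gcd (a % b).natAbs b.natAbs := Nat.gcd_comm _ _
        _ = Nat.gcd b.natAbs a.natAbs := by rw [h1]; exact (Nat.gcd_rec _ _).symm
        _ = Nat.gcd a.natAbs b.natAbs := Nat.gcd_comm _ _
    rw [this]

-- ===== VERDICT =====
theorem stein_rec_trace_spec : Claim_equal_stein_rec_trace := by
  intro a b data _ hpre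
  unfold Spec_stein_rec_trace stein_rec_trace stein_rec_trace_alt
  by_cases hb0 : b = 0
  · subst hb0; simp [steinA, euclidB]
  obtain ⟨ha, hb⟩ : 0 ≤ a ∧ 0 ≤ b := by
    rcases hpre with h | h
    · exact h
    · exact absurd h hb0
  rw [steinA_eq_gcd _ a b ha hb (by split_ifs with h <;> omega),
      euclidB_eq_gcd _ a b ha hb (by omega)]
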